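-- pv_equiv track=rewrite | github.com/lucper/cs212 | lesson03/regex.py | match_here
-- ===== SOURCE A (Python) =====
-- def match_here(pattern, text):
--     if not pattern:
--         return True
--     if pattern == '$':
--         return not text
--     if text and (pattern[0] == text[0] or pattern[0] == '.'):
--         return match_here(pattern[1:], text[1:])
--     return False
-- ===== SOURCE B (Python) =====
-- def match_here(pattern, text):
--     i = j = 0
--     m, n = len(pattern), len(text)
--     while i < m:
--         if pattern[i] == '$' and i == m - 1:
--             return j == n
--         if j < n and (pattern[i] == text[j] or pattern[i] == '.'):
--             i += 1
--             j += 1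
--         else:
--             return False
--     return True
-- ===== Notes on version B (the rewrite author's own statement) =====
-- stated objective: faster
-- what changed: Replaces the recursion that re-slices both strings at every step by an iterative while-loop over two indices into the unchanged pattern and text, with the '$' anchor recognised as 'last pattern position'.
import Mathlib
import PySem

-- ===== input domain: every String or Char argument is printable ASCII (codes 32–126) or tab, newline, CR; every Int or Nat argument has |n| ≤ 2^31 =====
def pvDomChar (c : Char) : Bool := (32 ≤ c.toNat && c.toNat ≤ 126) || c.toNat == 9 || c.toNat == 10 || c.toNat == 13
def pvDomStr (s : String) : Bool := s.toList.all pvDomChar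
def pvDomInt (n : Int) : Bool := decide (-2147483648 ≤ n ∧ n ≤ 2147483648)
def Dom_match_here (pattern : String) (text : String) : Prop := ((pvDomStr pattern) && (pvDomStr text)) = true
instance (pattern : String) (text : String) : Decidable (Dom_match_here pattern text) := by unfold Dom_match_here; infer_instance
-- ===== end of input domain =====

-- B replaces A's recursion-with-slicing by an iterative two-index loop; alternative decomposition, return value proved equal.

-- ===== PORT A =====
-- literal transliteration of A's recursion over the remaining pattern/text (slicing = tail)
def matchHereAux : List Char → List Char → Bool
  | [], _ => true
  | c :: ps, t =>
    if c :: ps = ['$'] then t.isEmpty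
    else
      match t with
      | [] => false
      | d :: ts => if c = d ∨ c = '.' then matchHereAux ps ts else false

def match_here (pattern : String) (text : String) : Bool :=
  matchHereAux pattern.toList text.toList

-- ===== PORT B =====
-- the while-loop of Source B: indices i into pattern, j into text
def matchIterGo (p t : List Char) (i j : Nat) : Bool :=
  if _h : i < p.length then
    if p.getD i ' ' = '$' ∧ i = p.length - 1 then decide (j = t.length)
    else if j < t.length ∧ (p.getD i ' ' = t.getD j ' ' ∨ p.getD i ' ' = '.') then
      matchIterGo p t (i + 1) (j + 1)
    else false
  else true
termination_by p.length - i

def match_here_alt (pattern : String) (text : String) : Bool :=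
  matchIterGo pattern.toList text.toList 0 0

-- ===== PRECONDITION & SPEC =====
def Spec_match_here (pattern : String) (text : String) (out : Bool) : Prop := out = match_here_alt pattern text
instance (pattern : String) (text : String) (out : Bool) : Decidable (Spec_match_here pattern text out) := by unfold Spec_match_here; infer_instance

-- ===== CLAIM (what is proved, stated in full; the proofs are below) =====
def Claim_equal_match_here : Prop := ∀ (pattern : String) (text : String), Dom_match_here pattern text → Spec_match_here pattern text (match_here pattern text)

-- ===== LEMMAS AND PROOFS =====

lemma matchHereAux_cons_nil (c : Char) (ps : List Char) :
    matchHereAux (c :: ps) [] = (if c :: ps = ['$'] then true else false) := by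
  rw [matchHereAux.eq_def]; rfl

lemma matchHereAux_cons_cons (c d : Char) (ps ts : List Char) :
    matchHereAux (c :: ps) (d :: ts) =
      (if c :: ps = ['$'] then false
       else if c = d ∨ c = '.' then matchHereAux ps ts else false) := by
  rw [matchHereAux.eq_def]; rfl

-- the loop at indices (i, j) computes A's recursion on the dropped suffixes
lemma matchIterGo_eq (p t : List Char) :
    ∀ k i j, p.length - i ≤ k → j ≤ t.length →
      matchIterGo p t i j = matchHereAux (p.drop i) (t.drop j) := by
  intro k
  induction k with
  | zero =>
    intro i j hk hj
    have hi : ¬ i < p.length := by omega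
    rw [matchIterGo]
    simp [hi, List.drop_eq_nil_of_le (by omega : p.length ≤ i), matchHereAux]
  | succ k ih =>
    intro i j hk hj
    by_cases hi : i < p.length
    · have hdp : p.drop i = p[i] :: p.drop (i + 1) := List.drop_eq_getElem_cons hi
      have hgp : p.getD i ' ' = p[i] := List.getD_eq_getElem _ _ hi
      have hcons : (p[i] :: p.drop (i + 1) = ['$']) ↔ (p[i] = '$' ∧ i = p.length - 1) := by
        constructor
        · intro h
          obtain ⟨h1, h2⟩ := List.cons_eq_cons.mp h
          have := List.drop_eq_nil_iff.mp h2
          exact ⟨h1, by omega⟩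
        · intro ⟨h1, h2⟩
          have : p.drop (i + 1) = [] := List.drop_eq_nil_of_le (by omega)
          simp [h1, this]
      rw [matchIterGo, dif_pos hi, hdp]
      by_cases hjl : j < t.length
      · have hdt : t.drop j = t[j] :: t.drop (j + 1) := List.drop_eq_getElem_cons hjl
        have hgt : t.getD j ' ' = t[j] := List.getD_eq_getElem _ _ hjl
        rw [hdt, matchHereAux_cons_cons]
        by_cases hdollar : p[i] = '$' ∧ i = p.length - 1
        · rw [if_pos (by rw [hgp]; exact hdollar), if_pos (hcons.mpr hdollar)]
          simp [show j ≠ t.length by omega]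
        · rw [if_neg (by rw [hgp]; exact hdollar), if_neg (fun h => hdollar (hcons.mp h))]
          by_cases hm : p[i] = t[j] ∨ p[i] = '.'
          · rw [if_pos (by rw [hgp, hgt]; exact ⟨hjl, hm⟩), if_pos hm,
              ih (i + 1) (j + 1) (by omega) (by omega)]
          · rw [if_neg (by rw [hgp, hgt]; exact fun h => hm h.2), if_neg hm]
      · have hdt : t.drop j = [] := List.drop_eq_nil_of_le (by omega)
        rw [hdt, matchHereAux_cons_nil]
        by_cases hdollar : p[i] = '$' ∧ i = p.length - 1
        · rw [if_pos (by rw [hgp]; exact hdollar), if_pos (hcons.mpr hdollar)]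
          simp [show j = t.length by omega]
        · rw [if_neg (by rw [hgp]; exact hdollar), if_neg (fun h => hdollar (hcons.mp h)),
            if_neg (fun h => hjl h.1)]
    · have hdp : p.drop i = [] := List.drop_eq_nil_of_le (by omega)
      rw [matchIterGo, dif_neg hi, hdp, matchHereAux]

-- ===== VERDICT (by name: the statement is the Claim_ definition above) =====
theorem match_here_spec : Claim_equal_match_here := by
  intro pattern text _
  unfold Spec_match_here match_here match_here_alt
  rw [matchIterGo_eq pattern.toList text.toList pattern.toList.length 0 0 (by omega) (by omega)]
  simp
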